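-- pv_equiv track=rewrite | github.com/rubsj/dsa-project-based | python/hashmaps/detect_patterned_access_sequence.py | get_pattern_key
-- ===== SOURCE A (Python) =====
-- def get_pattern_key(s):
--     pattern = []
--     char_map = {}
--     index =0
--     for c in s :
--         if c not in char_map:
--             char_map[c] = index
--             index +=1
--         pattern.append(char_map[c])
--     return tuple(pattern)
-- ===== SOURCE B (Python) =====
-- def get_pattern_key(s):
--     # rank of a char = how many distinct chars appear strictly before its first occurrence
--     return tuple(len(set(s[:s.index(c)])) for c in s)
-- ===== Notes on version B (the rewrite author's own statement) =====
-- stated objective: simpler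
-- what changed: Drops A's incremental char->index dictionary entirely: each character's rank is recomputed independently as the number of distinct characters in the prefix before its first occurrence (len(set(s[:s.index(c)]))), trading A's stateful numbering loop for a stateless one-line prefix-set count.
import Mathlib
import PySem

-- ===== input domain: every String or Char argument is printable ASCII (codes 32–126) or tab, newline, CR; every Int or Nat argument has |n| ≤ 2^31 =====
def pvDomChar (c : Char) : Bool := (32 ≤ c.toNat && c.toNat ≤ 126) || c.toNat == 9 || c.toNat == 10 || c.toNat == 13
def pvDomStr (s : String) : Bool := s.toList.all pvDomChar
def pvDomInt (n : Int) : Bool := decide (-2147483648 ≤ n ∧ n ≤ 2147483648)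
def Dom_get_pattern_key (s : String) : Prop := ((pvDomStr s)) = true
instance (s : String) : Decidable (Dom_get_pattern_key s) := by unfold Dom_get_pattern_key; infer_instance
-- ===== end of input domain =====

-- B drops A's stateful char->index dictionary: each rank is the count of distinct chars before the
-- character's first occurrence (a stateless prefix-set count); same return value proved, not faster.

-- ===== PORT A =====
-- one fused pass: numbers each unseen char and appends the number while scanning
def get_pattern_key (s : String) : List Int :=
  (s.toList.foldl
    (fun (st : List Int × PySem.Dict Char Int × Int) c =>
      let pattern := st.1
      let char_map := st.2.1
      let index := st.2.2
      if char_map.contains c = false then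
        let char_map := char_map.insert c index
        (pattern ++ [char_map.getD c 0], char_map, index + 1)
      else
        (pattern ++ [char_map.getD c 0], char_map, index))
    ([], PySem.Dict.empty, 0)).1

-- ===== PORT B =====
-- tuple(len(set(s[:s.index(c)])) for c in s); s.index(c) never raises since c is drawn from s,
-- so (index? l c).getD 0 is its exact total form, and the slice s[:k] with 0 <= k <= len is take k
def get_pattern_key_alt (s : String) : List Int :=
  let l := s.toList
  l.map (fun c => ((PySem.Set.ofList (l.take ((PySem.List.index? l c).getD 0))).length : Int))

-- ===== PRECONDITION & SPEC =====
def Spec_get_pattern_key (s : String) (out : List Int) : Prop := out = get_pattern_key_alt s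
instance (s : String) (out : List Int) : Decidable (Spec_get_pattern_key s out) := by unfold Spec_get_pattern_key; infer_instance

-- ===== CLAIM (what is proved, stated in full; the proofs are below) =====
def Claim_equal_get_pattern_key : Prop := ∀ (s : String), Dom_get_pattern_key s → Spec_get_pattern_key s (get_pattern_key s)

-- ===== LEMMAS AND PROOFS =====

-- A's loop body, zeta-reduced (definitionally equal to the lambda inside the port of A)
def pvStepA (st : List Int × PySem.Dict Char Int × Int) (c : Char) :
    List Int × PySem.Dict Char Int × Int :=
  if st.2.1.contains c = false then
    (st.1 ++ [(st.2.1.insert c st.2.2).getD c 0], st.2.1.insert c st.2.2, st.2.2 + 1)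
  else
    (st.1 ++ [st.2.1.getD c 0], st.2.1, st.2.2)

def pvRankTable (order : List Char) : PySem.Dict Char Int :=
  (PySem.List.enumerate order).foldl (fun d p => d.insert p.2 p.1) PySem.Dict.empty

theorem pvRankTable_items (o : List Char) (ho : o.Nodup) :
    (pvRankTable o).items = (PySem.List.enumerate o).map (fun p => (p.2, p.1)) := by
  have h := PySem.Dict.items_foldl_insert_fresh (PySem.List.enumerate o)
    (fun p => p.2) (fun p => p.1) PySem.Dict.empty
    (fun a _ => PySem.Dict.contains_empty _)
    (by rw [PySem.List.map_snd_enumerate]; exact ho)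
  simpa [pvRankTable] using h

theorem pvRankTable_keys (o : List Char) (ho : o.Nodup) : (pvRankTable o).keys = o := by
  show (pvRankTable o).items.map (·.1) = o
  rw [pvRankTable_items o ho, List.map_map]
  exact PySem.List.map_snd_enumerate o 0

theorem pvRankTable_contains (o : List Char) (ho : o.Nodup) (c : Char) :
    (pvRankTable o).contains c = true ↔ c ∈ o := by
  rw [PySem.Dict.contains_iff_mem_keys, pvRankTable_keys o ho]

theorem pvRankTable_not_contains (o : List Char) (ho : o.Nodup) (c : Char) (hc : c ∉ o) :
    (pvRankTable o).contains c = false := by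
  by_contra h
  exact hc ((pvRankTable_contains o ho c).1
    (by revert h; cases (pvRankTable o).contains c <;> simp))

theorem pvRankTable_getD (o : List Char) (ho : o.Nodup) (c : Char) (hc : c ∈ o) :
    (pvRankTable o).getD c 0 = (o.idxOf c : Int) := by
  have hk : (pvRankTable o).keys.Nodup := by rw [pvRankTable_keys o ho]; exact ho
  have hmem : (c, (o.idxOf c : Int)) ∈ (pvRankTable o).items := by
    rw [pvRankTable_items o ho]
    refine List.mem_map.2 ⟨((o.idxOf c : Int), c), ?_, rfl⟩
    rw [PySem.List.mem_enumerate_iff]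
    exact ⟨o.idxOf c, List.idxOf_lt_length_of_mem hc, by
      simp [List.getElem_idxOf (List.idxOf_lt_length_of_mem hc)]⟩
  exact PySem.Dict.getD_of_mem_items _ hmem hk 0

theorem pvRankTable_insert (o : List Char) (ho : o.Nodup) (c : Char) (hc : c ∉ o) :
    (pvRankTable o).insert c (o.length : Int) = pvRankTable (o ++ [c]) := by
  apply PySem.Dict.ext
  rw [PySem.Dict.items_insert_of_not_contains _ _ (pvRankTable_not_contains o ho c hc),
      pvRankTable_items o ho,
      pvRankTable_items (o ++ [c]) (by
        rw [List.nodup_append]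
        refine ⟨ho, List.nodup_singleton c, ?_⟩
        intro a ha b hb
        simp only [List.mem_singleton] at hb
        subst hb
        exact fun h => hc (h ▸ ha)),
      PySem.List.enumerate_append]
  simp

theorem pvIdx_update (o : List Char) (l : List Char) (c : Char) (hc : c ∈ o) :
    (PySem.Set.update o l).idxOf c = o.idxOf c := by
  rw [PySem.Set.update_eq_append_filter]
  exact List.idxOf_append_of_mem hc

theorem pvLoopA (l : List Char) (o : List Char) (ho : o.Nodup) (pat : List Int) :
    l.foldl pvStepA (pat, pvRankTable o, (o.length : Int))
    = (pat ++ l.map (fun c => (((PySem.Set.update o l).idxOf c : Nat) : Int)),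
       pvRankTable (PySem.Set.update o l),
       ((PySem.Set.update o l).length : Int)) := by
  induction l generalizing o pat with
  | nil => simp [PySem.Set.update_nil]
  | cons c l ih =>
    rw [PySem.Set.update_cons]
    by_cases hc : c ∈ o
    · have hco : (pvRankTable o).contains c = true := (pvRankTable_contains o ho c).2 hc
      rw [PySem.Set.add_of_mem hc]
      rw [List.foldl_cons, show pvStepA (pat, pvRankTable o, (o.length : Int)) c
            = (pat ++ [(pvRankTable o).getD c 0], pvRankTable o, (o.length : Int)) by
          simp [pvStepA, hco]]
      rw [ih o ho, pvRankTable_getD o ho c hc]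
      simp [pvIdx_update o l c hc, List.append_assoc]
    · have hco : (pvRankTable o).contains c = false := pvRankTable_not_contains o ho c hc
      have hnd : (o ++ [c]).Nodup := by
        rw [List.nodup_append]
        refine ⟨ho, List.nodup_singleton c, ?_⟩
        intro a ha b hb
        simp only [List.mem_singleton] at hb
        subst hb
        exact fun h => hc (h ▸ ha)
      have hmem : c ∈ o ++ [c] := by simp
      have hidx : (o ++ [c]).idxOf c = o.length := by
        rw [List.idxOf_append_of_notMem hc]; simp
      rw [PySem.Set.add_of_not_mem hc]
      rw [List.foldl_cons, show pvStepA (pat, pvRankTable o, (o.length : Int)) c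
            = (pat ++ [(o.length : Int)], pvRankTable (o ++ [c]), ((o ++ [c]).length : Int)) by
          simp [pvStepA, hco, pvRankTable_insert o ho c hc,
                pvRankTable_getD (o ++ [c]) hnd c hmem, hidx]]
      rw [ih (o ++ [c]) hnd]
      simp [pvIdx_update (o ++ [c]) l c hmem, hidx, List.append_assoc]

-- the bridge: the first-occurrence rank of c in set(l) equals the number of distinct
-- chars in the prefix of l strictly before c's first occurrence
theorem pvRankEqPrefixCount (l : List Char) (c : Char) (hc : c ∈ l) :
    (PySem.Set.ofList l).idxOf c
      = (PySem.Set.ofList (l.take ((PySem.List.index? l c).getD 0))).length := by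
  obtain ⟨k, hk⟩ := Option.isSome_iff_exists.1 ((PySem.List.index?_isSome_iff l c).2 hc)
  obtain ⟨pre, suf, hls, hlen, hcp⟩ := (PySem.List.index?_eq_some_iff l c k).1 hk
  have htake : l.take ((PySem.List.index? l c).getD 0) = pre := by
    rw [hk]
    simp only [Option.getD_some, hls, ← hlen]
    exact List.take_left
  have hcop : c ∉ PySem.Set.ofList pre := fun h => hcp ((PySem.Set.mem_ofList pre c).1 h)
  have hofl : PySem.Set.ofList l
      = PySem.Set.update (PySem.Set.ofList pre ++ [c]) suf := by
    rw [hls, PySem.Set.ofList_append, PySem.Set.update_cons,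
        PySem.Set.add_of_not_mem hcop]
  rw [htake, hofl, pvIdx_update _ _ c (by simp),
      List.idxOf_append_of_notMem hcop]
  simp

-- ===== VERDICT (by name: the statement is the Claim_ definition above) =====
theorem get_pattern_key_spec : Claim_equal_get_pattern_key := by
  intro s _
  show get_pattern_key s = get_pattern_key_alt s
  unfold get_pattern_key get_pattern_key_alt
  refine (congrArg Prod.fst (pvLoopA s.toList [] List.nodup_nil [])).trans ?_
  simp only [PySem.Set.update_nil_left, List.nil_append]
  apply List.map_congr_left
  intro c hcs
  rw [pvRankEqPrefixCount s.toList c hcs]
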